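-- pv_equiv track=rewrite | github.com/baparham/py-anki-card-creator | image_scraper.py | _get_opening_root_tag
-- ===== SOURCE A (Python) =====
-- def _get_opening_root_tag(html_input):
--     """Read through html input and return the full html tag (< to >) of the opening tag
--
--     Args:
--         html_input (str or bytes): HTML string to read the opening tag from
--
--     Returns:
--         str: the full opening tag string, e.g. <div id="ires">
--
--     Raises:
--         ValueError: if the provided html does not contain a valid opening tag structure
--     """
--     # for each character in the html_input, start reading, looking for opening and closing tags at start and end indices
--     start_index = None
--     end_index = None
--     cur_index = 0
--
--     # Make sure that if byte string is passed in, we modify it to be a string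
--     html_input = html_input.decode() if isinstance(html_input, bytes) else html_input
--     for character in html_input:
--         if character == "<":
--             # If we've already seen an opening tag before seeing the closing tag, bomb out
--             if start_index is not None:
--                 raise ValueError("Parameter html_input does not contain valid HTML - too many opening brackets")
--             start_index = cur_index
--         elif character == ">":
--             # If we haven't seen an opening tag yet, bomb out
--             if start_index is None:
--                 raise ValueError("Parameter html_input does not contain valid HTML - no opening bracket seen")
--             end_index = cur_index
--             # Break out of the for loop as soon as we find the closing tag to the first tag we found
--             break
--         cur_index += 1
--     # If either an opening tag or a closing tag hasn't been seen,
--     #   assume this is just text, and return None since this isn't valid HTML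
--     if start_index is None or end_index is None:
--         return None
--
--     # Return the section of html_input that represents the first valid tag we found
--     return html_input[start_index:end_index + 1]
-- ===== SOURCE B (Python) =====
-- def _get_opening_root_tag(html_input):
--     """Return the first full opening tag (from '<' to '>') of html_input, or None.
--
--     Uses a few str.find probes and positional comparisons instead of a
--     stateful per-character scan.
--     """
--     html = html_input.decode() if isinstance(html_input, bytes) else html_input
--     i = html.find("<")
--     j = html.find(">")
--     # a '>' strictly before any '<' means the scan hits '>' with no open tag
--     if j != -1 and (i == -1 or j < i):
--         raise ValueError("Parameter html_input does not contain valid HTML - no opening bracket seen")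
--     if i == -1:
--         return None
--     i2 = html.find("<", i + 1)
--     if j == -1:
--         if i2 != -1:
--             raise ValueError("Parameter html_input does not contain valid HTML - too many opening brackets")
--         return None
--     if i2 != -1 and i2 < j:
--         raise ValueError("Parameter html_input does not contain valid HTML - too many opening brackets")
--     return html[i:j + 1]
-- ===== Notes on version B (the rewrite author's own statement) =====
-- stated objective: simpler
-- what changed: Replaces the stateful per-character index loop with three str.find probes and positional comparisons (first '<', first '>', second '<'), then one slice; B raises the same ValueErrors on the same inputs, which Pre_ excludes.
import Mathlib
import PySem

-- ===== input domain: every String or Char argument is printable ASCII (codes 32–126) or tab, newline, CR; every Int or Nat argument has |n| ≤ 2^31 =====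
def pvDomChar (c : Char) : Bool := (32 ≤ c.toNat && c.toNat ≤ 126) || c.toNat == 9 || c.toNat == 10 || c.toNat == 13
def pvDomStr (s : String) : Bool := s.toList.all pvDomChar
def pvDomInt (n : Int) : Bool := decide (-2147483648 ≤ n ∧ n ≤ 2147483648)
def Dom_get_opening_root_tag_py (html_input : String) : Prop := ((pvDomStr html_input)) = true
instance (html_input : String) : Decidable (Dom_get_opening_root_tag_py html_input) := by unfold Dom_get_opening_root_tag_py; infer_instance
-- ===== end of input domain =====

-- B replaces A's stateful per-character scan by three find probes and positional
-- comparisons (objective: simpler). Both Pythons raise ValueError on the same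
-- malformed inputs; Pre_ excludes exactly those, and each port returns none there.

-- ===== PORT A =====
-- A's for-loop over the characters, carrying start_index (Option) and cur_index;
-- a `raise ValueError` is represented as `none` (those inputs are outside Pre_).
-- Returns the (start_index, end_index) pair when the loop ends via `break`.
def goA : List Char → Option Nat → Nat → Option (Nat × Nat)
  | [], _, _ => none      -- loop ended: end_index is None → function returns None
  | c :: rest, start, cur =>
    if c = '<' then
      match start with
      | some _ => none    -- raise ValueError: too many opening brackets
      | none => goA rest (some cur) (cur + 1)
    else if c = '>' then
      match start with
      | none => none      -- raise ValueError: no opening bracket seen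
      | some s => some (s, cur)   -- end_index = cur; break
    else goA rest start (cur + 1)

def get_opening_root_tag_py (html_input : String) : Option String :=
  match goA html_input.toList none 0 with
  | none => none
  | some (s, e) =>
      some (String.ofList (PySem.List.slice html_input.toList (some (s : Int)) (some ((e : Int) + 1))))

-- ===== PORT B =====
def get_opening_root_tag_py_alt (html_input : String) : Option String :=
  let i := PySem.Str.find html_input "<"
  let j := PySem.Str.find html_input ">"
  if j ≠ -1 ∧ (i = -1 ∨ j < i) then none      -- raise ValueError: no opening bracket seen
  else if i = -1 then none
  else
    let i2 := PySem.Str.findFrom html_input "<" (i + 1) none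
    if j = -1 then none      -- raise ValueError: too many opening brackets, if i2 ≠ -1; else return None
    else if i2 ≠ -1 ∧ i2 < j then none      -- raise ValueError: too many opening brackets
    else some (String.ofList (PySem.List.slice html_input.toList (some i) (some (j + 1))))

-- ===== PRECONDITION & SPEC =====
-- Pre_ holds exactly where Python A returns normally; it excludes the inputs on which
-- A raises ValueError ('>' before any '<', or a second '<' before the first '>').
def pvPreB (l : List Char) : Bool :=
  match l.findIdx? (· == '<'), l.findIdx? (· == '>') with
  | none, none => true
  | none, some _ => false
  | some _, none => l.count '<' == 1
  | some i, some j => decide (i < j) && ((l.take j).count '<' == 1)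

def Pre_get_opening_root_tag_py (html_input : String) : Prop :=
  pvPreB html_input.toList = true
instance (html_input : String) : Decidable (Pre_get_opening_root_tag_py html_input) := by
  unfold Pre_get_opening_root_tag_py; infer_instance

def pvWitness_get_opening_root_tag_py : String := "<div id=\"x\">ok"

def Spec_get_opening_root_tag_py (html_input : String) (out : Option String) : Prop :=
  out = get_opening_root_tag_py_alt html_input
instance (html_input : String) (out : Option String) : Decidable (Spec_get_opening_root_tag_py html_input out) := by
  unfold Spec_get_opening_root_tag_py; infer_instance

-- ===== CLAIM (what is proved, stated in full; the proofs are below) =====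
def Claim_equal_get_opening_root_tag_py : Prop := ∀ (html_input : String), Dom_get_opening_root_tag_py html_input → Pre_get_opening_root_tag_py html_input → Spec_get_opening_root_tag_py html_input (get_opening_root_tag_py html_input)

-- ===== LEMMAS AND PROOFS =====

lemma pv_singleton_prefix_iff (c : Char) (m : List Char) : [c] <+: m ↔ m.head? = some c := by
  cases m with
  | nil => simp
  | cons a t => simp [List.cons_prefix_cons, eq_comm]

/-- `s.find(c)` for a single character equals the first index of `c`, or `-1`. -/
lemma pv_find_single (l : List Char) (c : Char) :
    PySem.Chars.find l [c] =
      match l.findIdx? (· == c) with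
      | none => -1
      | some i => (i : Int) := by
  cases h : l.findIdx? (· == c) with
  | none =>
    rw [List.findIdx?_eq_none_iff] at h
    have hmem : c ∉ l := fun hc => by simpa using h c hc
    simpa [PySem.Chars.find_eq_neg_one_iff, List.singleton_infix_iff] using hmem
  | some i =>
    rw [List.findIdx?_eq_some_iff_getElem] at h
    obtain ⟨hlen, hget, hmin⟩ := h
    have hceq : l[i] = c := by simpa using hget
    have hin : c ∈ l := hceq ▸ l.getElem_mem hlen
    have h0 : 0 ≤ PySem.Chars.find l [c] :=
      (PySem.Chars.find_nonneg_iff l [c]).2 ((List.singleton_infix_iff c l).2 hin)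
    obtain ⟨hpre, hminf⟩ := PySem.Chars.find_spec (s := l) (sub := [c]) h0
    rw [pv_singleton_prefix_iff, List.head?_drop] at hpre
    have hfe : PySem.Chars.find l [c] = ((PySem.Chars.find l [c]).toNat : Int) := by omega
    set t := (PySem.Chars.find l [c]).toNat with ht
    have hteq : t = i := by
      rcases Nat.lt_trichotomy t i with hlt | heq | hgt
      · have := hmin t hlt
        have htl : t < l.length := (List.getElem?_eq_some_iff.1 hpre).1
        rw [List.getElem?_eq_getElem htl] at hpre
        simp [Option.some_inj.1 hpre] at this
      · exact heq
      · exact absurd ((pv_singleton_prefix_iff c _).2 (by rw [List.head?_drop, List.getElem?_eq_getElem hlen, hceq]))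
          (hminf i hgt)
    rw [hfe, hteq]

lemma pv_goA_some (l : List Char) (s0 : Nat) :
    ∀ c0, goA l (some s0) c0 =
      match l.findIdx? (· == '>'), l.findIdx? (· == '<') with
      | none, _ => none
      | some j, none => some (s0, c0 + j)
      | some j, some i => if j < i then some (s0, c0 + j) else none := by
  induction l with
  | nil => intro c0; simp [goA]
  | cons c rest ih =>
    intro c0
    by_cases hc : c = '<'
    · subst hc
      cases hj : rest.findIdx? (· == '>') <;>
        simp [goA, List.findIdx?_cons, hj]
    · by_cases hg : c = '>'
      · subst hg
        cases hi : rest.findIdx? (· == '<') <;>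
          simp [goA, List.findIdx?_cons, hi]
      · cases hj : rest.findIdx? (· == '>') with
        | none =>
          cases hi : rest.findIdx? (· == '<') <;>
            simp [goA, hc, hg, List.findIdx?_cons, hj, hi, ih]
        | some j =>
          cases hi : rest.findIdx? (· == '<') with
          | none =>
            simp [goA, hc, hg, List.findIdx?_cons, hj, hi, ih]
            omega
          | some i =>
            simp only [goA, ih, List.findIdx?_cons, beq_iff_eq, if_neg hg, if_neg hc, hj, hi, Option.map_some]
            by_cases hlt : j < i <;> · simp [hlt]; all_goals omega

lemma pv_idx_ne (l : List Char) (i j : Nat) (hi : l.findIdx? (· == '<') = some i)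
    (hj : l.findIdx? (· == '>') = some j) : i ≠ j := by
  rw [List.findIdx?_eq_some_iff_getElem] at hi hj
  obtain ⟨hli, hgi, -⟩ := hi
  obtain ⟨hlj, hgj, -⟩ := hj
  intro h
  subst h
  simp only [beq_iff_eq] at hgi hgj
  rw [hgi] at hgj
  exact absurd hgj (by decide)

/-- Characterisation of A's loop from the initial state, in terms of the first
    index of `'<'`, the first index of `'>'`, and the second index of `'<'`. -/
lemma pv_goA_none (l : List Char) :
    ∀ c0, goA l none c0 =
      match l.findIdx? (· == '<'), l.findIdx? (· == '>') with
      | some i, some j =>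
        if i < j then
          match (l.drop (i + 1)).findIdx? (· == '<') with
          | some d => if i + 1 + d < j then none else some (c0 + i, c0 + j)
          | none => some (c0 + i, c0 + j)
        else none
      | _, _ => none := by
  induction l with
  | nil => intro c0; simp [goA]
  | cons c rest ih =>
    intro c0
    by_cases hc : c = '<'
    · subst hc
      rw [show goA ('<' :: rest) none c0 = goA rest (some c0) (c0 + 1) by simp [goA],
        pv_goA_some]
      cases hj : rest.findIdx? (· == '>') with
      | none => simp [List.findIdx?_cons, hj]
      | some j =>
        cases hi : rest.findIdx? (· == '<') with
        | none =>
          simp [List.findIdx?_cons, hj, hi]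
          all_goals omega
        | some i =>
          have hne := pv_idx_ne rest i j hi hj
          simp only [List.findIdx?_cons, beq_iff_eq, reduceIte, hj, hi,
            Option.map_some, List.drop_succ_cons]
          by_cases hlt : j < i
          · simp [hlt, hi, show ¬ (0 + 1 + i < j + 1) by omega]
            all_goals omega
          · simp [hlt, hi, show 0 + 1 + i < j + 1 by omega]
    · by_cases hg : c = '>'
      · subst hg
        cases hi : rest.findIdx? (· == '<') <;>
          simp [goA, List.findIdx?_cons, hi]
      · cases hi : rest.findIdx? (· == '<') with
        | none =>
          cases hj : rest.findIdx? (· == '>') <;>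
            simp [goA, hc, hg, List.findIdx?_cons, hi, hj, ih]
        | some i =>
          cases hj : rest.findIdx? (· == '>') with
          | none => simp [goA, hc, hg, List.findIdx?_cons, hi, hj, ih]
          | some j =>
            simp only [goA, ih, List.findIdx?_cons, beq_iff_eq,
              if_neg hc, if_neg hg, hi, hj, Option.map_some, List.drop_succ_cons]
            by_cases hlt : i < j
            · simp only [show i + 1 < j + 1 ↔ True by simp; omega, if_pos (by omega : i < j),
                if_true]
              cases hd : (rest.drop (i + 1)).findIdx? (· == '<') with
              | none =>
                simp
                omega
              | some d =>
                by_cases h2 : i + 1 + d < j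
                · simp [h2, show i + 1 + 1 + d < j + 1 ↔ i + 1 + d < j by omega]
                · simp [h2, show i + 1 + 1 + d < j + 1 ↔ i + 1 + d < j by omega]
                  omega
            · simp [hlt, show ¬ (i + 1 < j + 1) by omega]

lemma pv_ports_agree (s : String) :
    get_opening_root_tag_py s = get_opening_root_tag_py_alt s := by
  unfold get_opening_root_tag_py get_opening_root_tag_py_alt
  have hfl : ("<" : String).toList = ['<'] := rfl
  have hgl : (">" : String).toList = ['>'] := rfl
  simp only [PySem.Str.find_eq, PySem.Str.findFrom_eq, hfl, hgl, pv_goA_none]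
  cases hi : s.toList.findIdx? (· == '<') with
  | none =>
    cases hj : s.toList.findIdx? (· == '>') with
    | none => simp [pv_find_single, hi, hj]
    | some j => simp [pv_find_single, hi, hj]
  | some i =>
    have hilen : i < s.toList.length := by
      rcases List.findIdx?_eq_some_iff_getElem.1 hi with ⟨h, -⟩; exact h
    cases hj : s.toList.findIdx? (· == '>') with
    | none =>
      simp [pv_find_single, hi, hj]
    | some j =>
      have hne := pv_idx_ne s.toList i j hi hj
      by_cases hlt : j < i
      · simp [pv_find_single, hi, hj, hlt, show ¬ (i < j) by omega]
      · have hij : i < j := by omega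
        have hk : i + 1 ≤ s.toList.length := by omega
        have hcast : ((i : Int) + 1) = ((i + 1 : Nat) : Int) := by push_cast; ring
        simp only [pv_find_single, hi, hj, if_pos hij]
        rw [if_neg (by omega : ¬ ((j:Int) ≠ -1 ∧ ((i:Int) = -1 ∨ (j:Int) < (i:Int)))),
          if_neg (by omega : ¬ (i : Int) = -1), hcast,
          PySem.Chars.findFrom_natCast s.toList ['<'] (i + 1) hk, pv_find_single]
        cases hd : (s.toList.drop (i + 1)).findIdx? (· == '<') with
        | none =>
          simp [show ¬ ((j : Int) = -1) by omega]
        | some d =>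
          have hne2 : ¬ (((i + 1 : Nat) : Int) + (d : Int) = -1) := by push_cast; omega
          by_cases h2 : i + 1 + d < j
          · simp [show ¬ ((j : Int) = -1) by omega, h2]
            all_goals omega
          · simp [show ¬ ((j : Int) = -1) by omega, h2]
            all_goals omega

-- ===== VERDICT (by name: the statement is the Claim_ definition above) =====
theorem get_opening_root_tag_py_spec : Claim_equal_get_opening_root_tag_py := by
  intro s _ _
  unfold Spec_get_opening_root_tag_py
  exact pv_ports_agree s
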